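-- pv_equiv track=rewrite | github.com/rwhaling/PhiloLogic4 | python/philologic/Query.py | old_format_query
-- ===== SOURCE A (Python) =====
-- def old_format_query(qstring):
--     q = [level.split("|") for level in qstring.split(" ") ]
--     qs = ""
--     for level in q:
--         for token in level:
--             qs += token + "\n"
--         qs += "\n"
--     qs = qs[:-1] # to trim off the last newline.  just a quirk of the language.
--     return qs
-- ===== SOURCE B (Python) =====
-- def old_format_query(qstring):
--     # Single-pass string substitution: '|' separates tokens within a level
--     # (one newline), ' ' separates levels (blank line); A always leaves one
--     # trailing newline, reproduced by the final + "\n".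
--     return qstring.replace("|", "\n").replace(" ", "\n\n") + "\n"
-- ===== Notes on version B (the rewrite author's own statement) =====
-- stated objective: simpler
-- what changed: Replaces A's split-into-nested-lists + double loop + final trim with a single-pass pure string substitution: '|' -> '\n', ' ' -> '\n\n', plus one trailing '\n'.
import Mathlib
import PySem

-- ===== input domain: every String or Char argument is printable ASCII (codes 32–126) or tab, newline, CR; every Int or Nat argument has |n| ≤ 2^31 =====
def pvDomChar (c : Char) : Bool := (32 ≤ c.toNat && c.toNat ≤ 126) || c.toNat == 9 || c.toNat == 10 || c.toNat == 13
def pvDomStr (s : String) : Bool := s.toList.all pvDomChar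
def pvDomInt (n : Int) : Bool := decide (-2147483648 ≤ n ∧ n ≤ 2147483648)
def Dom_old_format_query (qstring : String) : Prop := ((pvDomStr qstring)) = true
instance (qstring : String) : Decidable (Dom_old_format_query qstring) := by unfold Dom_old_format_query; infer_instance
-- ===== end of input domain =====

-- B replaces A's split-into-nested-lists + double loop + trim with a single-pass
-- string substitution ('|' -> "\n", ' ' -> "\n\n", plus one trailing "\n"); objective: simpler.


-- ===== PORT A =====
def old_format_query (qstring : String) : String :=
  let q := (PySem.Chars.splitOn qstring.toList [' ']).map
    (fun level => PySem.Chars.splitOn level ['|'])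
  let qs := q.foldl
    (fun qs level =>
      (level.foldl (fun qs token => qs ++ token ++ ['\n']) qs) ++ ['\n'])
    ([] : List Char)
  String.ofList (PySem.Chars.slice qs none (some (-1)))

-- ===== PORT B =====
def old_format_query_alt (qstring : String) : String :=
  String.ofList (PySem.Chars.replace
      (PySem.Chars.replace qstring.toList ['|'] ['\n']) [' '] ['\n', '\n']
    ++ ['\n'])

-- ===== PRECONDITION & SPEC =====
def Spec_old_format_query (qstring : String) (out : String) : Prop := out = old_format_query_alt qstring
instance (qstring : String) (out : String) : Decidable (Spec_old_format_query qstring out) := by unfold Spec_old_format_query; infer_instance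

-- ===== CLAIM (what is proved, stated in full; the proofs are below) =====
def Claim_equal_old_format_query : Prop := ∀ (qstring : String), Dom_old_format_query qstring → Spec_old_format_query qstring (old_format_query qstring)

-- ===== LEMMAS AND PROOFS =====

-- per-character expansion both programs compute: '|' -> "\n", ' ' -> "\n\n"
def pvExp (c : Char) : List Char :=
  if c = '|' then ['\n'] else if c = ' ' then ['\n', '\n'] else [c]

-- spec of splitting on a single character
def pvSplit1 (a : Char) : List Char → List (List Char)
  | [] => [[]]
  | c :: t =>
      if c = a then [] :: pvSplit1 a t
      else
        match pvSplit1 a t with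
        | [] => [[c]]
        | p :: ps => (c :: p) :: ps

theorem pvSplit1_ne_nil (a : Char) (l : List Char) : pvSplit1 a l ≠ [] := by
  cases l with
  | nil => simp [pvSplit1]
  | cons c t =>
    simp only [pvSplit1]
    split_ifs
    · simp
    · cases pvSplit1 a t <;> simp

theorem pvReplace_go_single (a : Char) (new : List Char) :
    ∀ (l : List Char) (fuel : Nat) (acc : List Char), l.length ≤ fuel →
      PySem.Chars.replace.go [a] new fuel l acc
        = acc.reverse ++ l.flatMap (fun c => if c = a then new else [c]) := by
  intro l
  induction l with
  | nil => intro fuel acc _; cases fuel <;> simp [PySem.Chars.replace.go]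
  | cons c t ih =>
    intro fuel acc h
    cases fuel with
    | zero => simp at h
    | succ n =>
      simp only [List.length_cons, Nat.succ_le_succ_iff] at h
      by_cases hc : a = c
      · subst hc
        simp [PySem.Chars.replace.go, List.isPrefixOf, ih n _ h]
      · simp [PySem.Chars.replace.go, List.isPrefixOf, hc, ih n _ h, Ne.symm hc]

theorem pvReplace_single (a : Char) (new l : List Char) :
    PySem.Chars.replace l [a] new
      = l.flatMap (fun c => if c = a then new else [c]) := by
  simpa [PySem.Chars.replace] using
    pvReplace_go_single a new l l.length [] le_rfl

theorem pvSplitOn_go_single (a : Char) :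
    ∀ (l : List Char) (fuel : Nat) (cur : List Char) (acc : List (List Char)),
      l.length ≤ fuel →
      PySem.Chars.splitOn.go [a] fuel l cur acc
        = acc.reverse
            ++ ((cur.reverse ++ (pvSplit1 a l).headI) :: (pvSplit1 a l).tail) := by
  intro l
  induction l with
  | nil => intro fuel cur acc _; cases fuel <;> simp [PySem.Chars.splitOn.go, pvSplit1]
  | cons c t ih =>
    intro fuel cur acc h
    cases fuel with
    | zero => simp at h
    | succ n =>
      simp only [List.length_cons, Nat.succ_le_succ_iff] at h
      have hne := pvSplit1_ne_nil a t
      by_cases hc : a = c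
      · subst hc
        rw [show PySem.Chars.splitOn.go [a] (n + 1) (a :: t) cur acc
              = PySem.Chars.splitOn.go [a] n t [] (cur.reverse :: acc) by
            simp [PySem.Chars.splitOn.go, List.isPrefixOf]]
        rw [ih n [] (cur.reverse :: acc) h]
        cases hps : pvSplit1 a t with
        | nil => exact absurd hps hne
        | cons p ps => simp [pvSplit1, hps]
      · rw [show PySem.Chars.splitOn.go [a] (n + 1) (c :: t) cur acc
              = PySem.Chars.splitOn.go [a] n t (c :: cur) acc by
            simp [PySem.Chars.splitOn.go, List.isPrefixOf, hc]]
        rw [ih n (c :: cur) acc h]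
        cases hps : pvSplit1 a t with
        | nil => exact absurd hps hne
        | cons p ps => simp [pvSplit1, hps, Ne.symm hc]

theorem pvSplitOn_single (a : Char) (l : List Char) :
    PySem.Chars.splitOn l [a] = pvSplit1 a l := by
  have h := pvSplitOn_go_single a l (l.length + 1) [] [] (by omega)
  have hne := pvSplit1_ne_nil a l
  cases hps : pvSplit1 a l with
  | nil => exact absurd hps hne
  | cons p ps =>
    rw [hps] at h
    simpa [PySem.Chars.splitOn, hps] using h

theorem pvOuterFold (ls : List (List (List Char))) :
    ∀ qs : List Char,
      ls.foldl
          (fun qs level =>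
            (level.foldl (fun qs token => qs ++ token ++ ['\n']) qs) ++ ['\n'])
          qs
        = qs ++ ls.flatMap (fun lv => lv.flatMap (fun t => t ++ ['\n']) ++ ['\n']) := by
  induction ls with
  | nil => simp
  | cons l ls ih => intro qs; simp [List.flatMap]

-- one level: tokens-with-newlines = charwise '|'->newline expansion plus a newline
theorem pvLevel (lv : List Char) :
    (pvSplit1 '|' lv).flatMap (fun t => t ++ ['\n'])
      = lv.flatMap (fun c => if c = '|' then ['\n'] else [c]) ++ ['\n'] := by
  induction lv with
  | nil => simp [pvSplit1]
  | cons c t ih =>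
    by_cases hc : c = '|'
    · simp [pvSplit1, hc, ih]
    · have hne := pvSplit1_ne_nil '|' t
      cases hps : pvSplit1 '|' t with
      | nil => exact absurd hps hne
      | cons p ps =>
        simp only [pvSplit1, hc, if_false, hps]
        simp only [hps] at ih
        simp [hc, ← ih]

-- whole string, normalized body: per-level charwise expansion plus a blank line
theorem pvWhole' (cs : List Char) :
    (pvSplit1 ' ' cs).flatMap
        (fun lv => lv.flatMap (fun c => if c = '|' then ['\n'] else [c]) ++ ['\n', '\n'])
      = cs.flatMap pvExp ++ ['\n', '\n'] := by
  induction cs with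
  | nil => simp [pvSplit1]
  | cons c t ih =>
    by_cases hc : c = ' '
    · simp [pvSplit1, hc, ih, pvExp]
    · have hne := pvSplit1_ne_nil ' ' t
      cases hps : pvSplit1 ' ' t with
      | nil => exact absurd hps hne
      | cons p ps =>
        simp only [pvSplit1, hc, if_false, hps]
        simp only [hps] at ih
        have hexp : pvExp c = (if c = '|' then ['\n'] else [c]) := by
          by_cases h2 : c = '|' <;> simp [pvExp, h2, hc]
        simp only [List.flatMap_cons] at ih ⊢
        simp [← ih, hexp]

-- whole string: per-level expansion = charwise pvExp expansion plus a blank line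
theorem pvWhole (cs : List Char) :
    (pvSplit1 ' ' cs).flatMap
        (fun lv => (pvSplit1 '|' lv).flatMap (fun t => t ++ ['\n']) ++ ['\n'])
      = cs.flatMap pvExp ++ ['\n', '\n'] := by
  have h := pvWhole' cs
  simpa only [pvLevel, List.append_assoc, List.cons_append, List.nil_append] using h

-- composing the two single-character substitutions gives pvExp
theorem pvCompose (cs : List Char) :
    (cs.flatMap (fun c => if c = '|' then ['\n'] else [c])).flatMap
        (fun c => if c = ' ' then ['\n', '\n'] else [c])
      = cs.flatMap pvExp := by
  induction cs with
  | nil => rfl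
  | cons c t ih =>
    simp only [List.flatMap_cons, List.flatMap_append, ih]
    congr 1
    by_cases h1 : c = '|'
    · simp [h1, pvExp]
    · by_cases h2 : c = ' ' <;> simp [h1, h2, pvExp]

-- ===== VERDICT (by name: the statement is the Claim_ definition above) =====
theorem old_format_query_spec : Claim_equal_old_format_query := by
  intro qstring _
  unfold Spec_old_format_query old_format_query old_format_query_alt
  set cs := qstring.toList with hcs
  simp only [pvSplitOn_single, pvReplace_single, pvOuterFold, List.nil_append,
    PySem.Chars.slice_eq_listSlice, PySem.List.slice_to_neg_one]
  congr 1
  rw [List.flatMap_map, pvWhole]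
  have hdrop : (cs.flatMap pvExp ++ ['\n', '\n']).dropLast
      = cs.flatMap pvExp ++ ['\n'] := by
    have h2 : cs.flatMap pvExp ++ ['\n', '\n']
        = (cs.flatMap pvExp ++ ['\n']) ++ ['\n'] := by simp
    rw [h2, List.dropLast_concat]
  rw [hdrop, pvCompose]
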